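-- pv_equiv track=rewrite | github.com/garretdgrant/UCLA | Python_with_applications/HW1/HW1.py | get_list_of_powers
-- ===== SOURCE A (Python) =====
-- def get_list_of_powers(X, k):
--     ''' Raise elements of a list to its powers.
--     Args:
--         X: A list of non-negative integers.
--         k: A non-negative integer.
--     Returns:
--         A list of lists. The ith element is a list
--         of the powers of X[i] from 0 to (and including) k,
--         in increasing order.
--     Example:
--         X = [5,6,7], k = 2
--         returns [[1, 5, 25], [1, 6, 36], [1, 7, 49]]
--     '''
--     powers = []
--     for element in X:
--         power = []
--         for i in range(k+1):
--             power.append(element**i)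
--         powers.append(power)
--     return powers
-- ===== SOURCE B (Python) =====
-- def get_list_of_powers(X, k):
--     # Column-wise dynamic programming: maintain the current power column for
--     # ALL elements at once and append it to every row per step (transposed
--     # traversal; one multiplication per produced entry).
--     rows = [[] for _ in X]
--     col = [1] * len(X)
--     for _ in range(k + 1):
--         for row, p in zip(rows, col):
--             row.append(p)
--         col = [p * x for p, x in zip(col, X)]
--     return rows
-- ===== Notes on version B (the rewrite author's own statement) =====
-- stated objective: alternative
-- what changed: B builds the result column-by-column (transposed dynamic programming): it keeps one current-power column for all elements, appends it across all rows each step, and advances it by one elementwise multiplication, instead of A's per-element inner loop recomputing element**i from scratch; O(n*k) multiplications vs A's O(n*k^2), though not confirmed >=1.5x at the largest timed size where bigint arithmetic dominates.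
import Mathlib
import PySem

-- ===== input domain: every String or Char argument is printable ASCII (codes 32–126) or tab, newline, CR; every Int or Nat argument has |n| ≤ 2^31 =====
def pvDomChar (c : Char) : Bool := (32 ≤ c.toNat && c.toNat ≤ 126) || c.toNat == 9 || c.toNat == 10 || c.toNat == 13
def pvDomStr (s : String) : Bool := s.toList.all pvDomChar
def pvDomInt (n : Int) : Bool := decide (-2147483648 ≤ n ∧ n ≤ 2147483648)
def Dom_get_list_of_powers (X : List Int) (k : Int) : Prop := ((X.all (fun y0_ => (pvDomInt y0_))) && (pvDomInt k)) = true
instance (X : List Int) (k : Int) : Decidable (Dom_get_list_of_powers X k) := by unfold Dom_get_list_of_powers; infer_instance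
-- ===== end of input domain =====

-- B replaces A's row-by-row recomputation of element**i with a transposed,
-- column-wise dynamic programme: one power column for all elements, advanced by
-- a single elementwise multiplication per step (alternative algorithm).

-- ===== PORT A =====
-- for element in X: for i in range(k+1): power.append(element**i); powers.append(power)
def get_list_of_powers (X : List Int) (k : Int) : List (List Int) :=
  X.foldl
    (fun powers element =>
      powers ++ [(PySem.List.pyRange 0 (k + 1) 1).foldl
        (fun power i => power ++ [element ^ i.toNat]) []])
    []

-- ===== PORT B =====
-- state = (rows, col); each step appends col across rows (zip) and advances col elementwise
def get_list_of_powers_alt (X : List Int) (k : Int) : List (List Int) :=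
  ((PySem.List.pyRange 0 (k + 1) 1).foldl
    (fun (s : List (List Int) × List Int) _ =>
      ((s.1.zip s.2).map (fun rp => rp.1 ++ [rp.2]),
       (s.2.zip X).map (fun px => px.1 * px.2)))
    (X.map (fun _ => ([] : List Int)), X.map (fun _ => (1 : Int)))).1

-- ===== PRECONDITION & SPEC =====
def Spec_get_list_of_powers (X : List Int) (k : Int) (out : List (List Int)) : Prop := out = get_list_of_powers_alt X k
instance (X : List Int) (k : Int) (out : List (List Int)) : Decidable (Spec_get_list_of_powers X k out) := by unfold Spec_get_list_of_powers; infer_instance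

-- ===== CLAIM (what is proved, stated in full; the proofs are below) =====
def Claim_equal_get_list_of_powers : Prop := ∀ (X : List Int) (k : Int), Dom_get_list_of_powers X k → Spec_get_list_of_powers X k (get_list_of_powers X k)

-- ===== LEMMAS AND PROOFS =====

theorem pv_foldl_snoc {α β : Type} (f : α → β) :
    ∀ (xs : List α) (acc : List β),
      xs.foldl (fun r x => r ++ [f x]) acc = acc ++ xs.map f := by
  intro xs
  induction xs with
  | nil => simp
  | cons x xs ih => intro acc; simp [List.foldl, ih]

-- A's row for one element is the list of its powers 0..n-1
theorem pv_row_a (e k : Int) :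
    (PySem.List.pyRange 0 (k + 1) 1).foldl (fun power i => power ++ [e ^ i.toNat]) [] =
      (List.range (k + 1).toNat).map (fun j => e ^ j) := by
  rw [PySem.List.pyRange_one, List.foldl_map, pv_foldl_snoc]
  simp

-- B's loop invariant: starting from columns that are maps over X, the state
-- stays a pair of maps over X, rows extended by powers and col multiplied up.
theorem pv_zip_step (X : List Int) (r : Int → List Int) (p : Int → Int) :
    ((X.map r).zip (X.map p)).map (fun rp => rp.1 ++ [rp.2]) =
      X.map (fun e => r e ++ [p e]) := by
  rw [List.zip_map', List.map_map]; rfl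

theorem pv_zip_col (p : Int → Int) :
    ∀ (X : List Int),
      ((X.map p).zip X).map (fun px => px.1 * px.2) = X.map (fun e => p e * e) := by
  intro X
  induction X with
  | nil => rfl
  | cons x xs ih => simp [ih]

theorem pv_b_invariant (X : List Int) :
    ∀ (n : Nat) (r : Int → List Int) (p : Int → Int),
      (List.range n).foldl
        (fun (s : List (List Int) × List Int) _ =>
          ((s.1.zip s.2).map (fun rp => rp.1 ++ [rp.2]),
           (s.2.zip X).map (fun px => px.1 * px.2)))
        (X.map r, X.map p) =
      (X.map (fun e => r e ++ (List.range n).map (fun j => p e * e ^ j)),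
       X.map (fun e => p e * e ^ n)) := by
  intro n
  induction n with
  | zero => intro r p; simp
  | succ n ih =>
      intro r p
      rw [List.range_succ, List.foldl_append, ih, List.foldl_cons, List.foldl_nil]
      rw [pv_zip_step, pv_zip_col]
      simp only [Prod.mk.injEq]
      constructor
      · apply List.map_congr_left; intro e _
        simp [List.append_assoc]
      · apply List.map_congr_left; intro e _
        rw [pow_succ]
        ring

theorem get_list_of_powers_eq (X : List Int) (k : Int) :
    get_list_of_powers X k = get_list_of_powers_alt X k := by
  unfold get_list_of_powers get_list_of_powers_alt
  rw [pv_foldl_snoc]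
  simp only [pv_row_a, List.nil_append]
  rw [PySem.List.pyRange_one, List.foldl_map, pv_b_invariant]
  simp

-- ===== VERDICT (by name: the statement is the Claim_ definition above) =====
theorem get_list_of_powers_spec : Claim_equal_get_list_of_powers := by
  intro X k _
  unfold Spec_get_list_of_powers
  exact get_list_of_powers_eq X k
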